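-- pv_equiv track=rewrite | github.com/AstrBotDevs/AstrBot | astrbot/core/utils/t2i/template_manager.py | _remove_decode_base64_utf8_helper
-- ===== SOURCE A (Python) =====
-- def _remove_decode_base64_utf8_helper(content: str) -> str:
--     lines = content.splitlines(keepends=True)
--     migrated_lines: list[str] = []
--     index = 0
--     while index < len(lines):
--         line = lines[index]
--         if "function decodeBase64Utf8(base64Text)" not in line:
--             migrated_lines.append(line)
--             index += 1
--             continue
--
--         depth = 0
--         while index < len(lines):
--             depth += lines[index].count("{") - lines[index].count("}")
--             index += 1
--             if depth <= 0:
--                 break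
--
--         if migrated_lines and not migrated_lines[-1].strip():
--             migrated_lines.pop()
--
--     return "".join(migrated_lines)
-- ===== SOURCE B (Python) =====
-- NEEDLE = "function decodeBase64Utf8(base64Text)"
--
--
-- def _remove_decode_base64_utf8_helper(content: str) -> str:
--     out: list = []
--     skipping = False
--     depth = 0
--     for line in content.splitlines(keepends=True):
--         if skipping:
--             depth += line.count("{") - line.count("}")
--             if depth <= 0:
--                 skipping = False
--         elif NEEDLE in line:
--             if out and not out[-1].strip():
--                 out.pop()
--             depth = line.count("{") - line.count("}")
--             if depth > 0:
--                 skipping = True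
--         else:
--             out.append(line)
--     return "".join(out)
-- ===== Notes on version B (the rewrite author's own statement) =====
-- stated objective: simpler
-- what changed: Replaced A's nested index-driven while-loops (outer scan plus inner brace-skip loop plus post-skip pop) by a single for-loop state machine over the lines with a skipping flag and depth counter, popping the preceding blank kept line at needle time.
import Mathlib
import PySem

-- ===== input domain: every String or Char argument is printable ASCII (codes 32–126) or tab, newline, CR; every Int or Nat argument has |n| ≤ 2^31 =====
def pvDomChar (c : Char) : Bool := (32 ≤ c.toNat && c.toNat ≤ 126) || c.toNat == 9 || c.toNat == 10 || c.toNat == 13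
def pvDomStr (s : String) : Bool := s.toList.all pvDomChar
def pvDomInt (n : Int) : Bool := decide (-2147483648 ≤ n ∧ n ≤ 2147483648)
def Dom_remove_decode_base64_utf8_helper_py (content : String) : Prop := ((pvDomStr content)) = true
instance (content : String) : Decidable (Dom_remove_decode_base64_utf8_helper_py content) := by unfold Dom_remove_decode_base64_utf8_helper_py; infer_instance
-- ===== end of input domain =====

-- B replaces A's nested index-driven while loops by a single-pass state machine over the lines (simpler decomposition, same cost).

-- shared helper: content.splitlines(keepends=True), hand-ported step for step
-- (PySem.Str.splitlines is the keepends=False form); exact on the stated domain,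
-- where the only line boundaries present are '\n', '\r\n' and '\r'.
def pvSplitKeep : List Char → List (List Char)
  | [] => []
  | '\r' :: '\n' :: rest => ('\r' :: '\n' :: []) :: pvSplitKeep rest
  | '\r' :: rest => ['\r'] :: pvSplitKeep rest
  | '\n' :: rest => ['\n'] :: pvSplitKeep rest
  | c :: rest =>
    match pvSplitKeep rest with
    | [] => [[c]]
    | l :: ls => (c :: l) :: ls

-- shared: the needle literal and line.count("{") - line.count("}") (both Pythons have this code)
def pvNeedle : List Char := "function decodeBase64Utf8(base64Text)".toList

def pvCountBrace (line : List Char) : Int :=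
  (PySem.Chars.count line ['{'] : Int) - (PySem.Chars.count line ['}'] : Int)

-- ===== PORT A =====
-- inner while loop of A: consume lines adding brace counts until depth <= 0 (or input ends)
def pvASkip (depth : Int) : List (List Char) → List (List Char)
  | [] => []
  | l :: rest =>
    if depth + pvCountBrace l ≤ 0 then rest else pvASkip (depth + pvCountBrace l) rest

-- termination helper for the outer loop (cited by pvAGo's decreasing_by)
theorem pvASkip_len : ∀ (rest : List (List Char)) (d : Int) (l : List Char),
    (pvASkip d (l :: rest)).length ≤ rest.length := by
  intro rest
  induction rest with
  | nil =>
    intro d l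
    simp only [pvASkip]
    split <;> simp
  | cons r rs ih =>
    intro d l
    simp only [pvASkip]
    split
    · exact Nat.le_refl _
    · exact Nat.le_trans (ih _ r) (Nat.le_succ _)

-- outer while loop of A; migrated_lines kept as a reversed stack (append = cons, pop = tail)
def pvAGo : List (List Char) → List (List Char) → List (List Char)
  | acc, [] => acc.reverse
  | acc, l :: rest =>
    if PySem.Chars.isIn pvNeedle l = false then
      pvAGo (l :: acc) rest
    else
      pvAGo
        (match acc with
         | [] => []
         | a :: as => if PySem.Chars.strip a = [] then as else a :: as)
        (pvASkip 0 (l :: rest))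
termination_by _ lines => lines.length
decreasing_by
  · simp
  · exact Nat.lt_succ_of_le (pvASkip_len rest 0 l)

def remove_decode_base64_utf8_helper_py (content : String) : String :=
  String.ofList (PySem.Chars.join [] (pvAGo [] (pvSplitKeep content.toList)))

-- ===== PORT B =====
-- one step of B's state machine: state = (out stack (reversed), skipping flag, depth)
def pvBStep (st : List (List Char) × Bool × Int) (line : List Char) :
    List (List Char) × Bool × Int :=
  match st with
  | (out, skipping, depth) =>
    if skipping then
      let d := depth + pvCountBrace line
      if d ≤ 0 then (out, false, d) else (out, true, d)
    else if PySem.Chars.isIn pvNeedle line then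
      let out' : List (List Char) :=
        match out with
        | [] => []
        | a :: as => if PySem.Chars.strip a = [] then as else a :: as
      let d := pvCountBrace line
      if 0 < d then (out', true, d) else (out', false, d)
    else
      (line :: out, skipping, depth)

def remove_decode_base64_utf8_helper_py_alt (content : String) : String :=
  String.ofList (PySem.Chars.join []
    (((pvSplitKeep content.toList).foldl pvBStep ([], false, 0)).1.reverse))

-- ===== PRECONDITION & SPEC =====
def Spec_remove_decode_base64_utf8_helper_py (content : String) (out : String) : Prop := out = remove_decode_base64_utf8_helper_py_alt content
instance (content : String) (out : String) : Decidable (Spec_remove_decode_base64_utf8_helper_py content out) := by unfold Spec_remove_decode_base64_utf8_helper_py; infer_instance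

-- ===== CLAIM (what is proved, stated in full; the proofs are below) =====
def Claim_equal_remove_decode_base64_utf8_helper_py : Prop := ∀ (content : String), Dom_remove_decode_base64_utf8_helper_py content → Spec_remove_decode_base64_utf8_helper_py content (remove_decode_base64_utf8_helper_py content)

-- ===== LEMMAS AND PROOFS =====

-- from a non-skipping state, the output component never depends on the carried depth
theorem pvDepthIrrel : ∀ (lines : List (List Char)) (out : List (List Char)) (d₁ d₂ : Int),
    ((lines.foldl pvBStep (out, false, d₁)).1) = ((lines.foldl pvBStep (out, false, d₂)).1) := by
  intro lines
  induction lines with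
  | nil => intro out d₁ d₂; rfl
  | cons l rest ih =>
    intro out d₁ d₂
    simp only [List.foldl, pvBStep]
    by_cases hn : PySem.Chars.isIn pvNeedle l = true
    · simp [hn]
    · simp [hn]; exact ih _ d₁ d₂

-- the skipping phase of B consumes exactly the lines A's inner loop consumes
theorem pvSkipFold : ∀ (rest : List (List Char)) (d : Int) (out : List (List Char)), 0 < d →
    ((rest.foldl pvBStep (out, true, d)).1)
      = (((pvASkip d rest).foldl pvBStep (out, false, 0)).1) := by
  intro rest
  induction rest with
  | nil => intro d out _; rfl
  | cons l rs ih =>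
    intro d out hd
    simp only [List.foldl, pvBStep, pvASkip]
    by_cases h : d + pvCountBrace l ≤ 0
    · simp only [h, if_pos]
      exact pvDepthIrrel rs out _ 0
    · simp only [h, if_false]
      exact ih _ out (by omega)

-- main invariant: B's fold from a non-skipping state computes A's outer loop
theorem pvMain : ∀ (n : Nat) (lines acc : List (List Char)), lines.length ≤ n →
    ((lines.foldl pvBStep (acc, false, 0)).1) = (pvAGo acc lines).reverse := by
  intro n
  induction n with
  | zero =>
    intro lines acc h
    have : lines = [] := List.eq_nil_of_length_eq_zero (Nat.le_zero.mp h)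
    subst this
    simp [pvAGo]
  | succ n ih =>
    intro lines acc h
    match lines with
    | [] => simp [pvAGo]
    | l :: rest =>
      simp only [List.length_cons, Nat.succ_le_succ_iff] at h
      by_cases hn : PySem.Chars.isIn pvNeedle l = true
      · -- needle line
        simp only [List.foldl, pvBStep, hn, if_true, if_false, Bool.false_eq_true]
        rw [pvAGo.eq_def]
        simp only [hn, Bool.true_eq_false, if_false]
        set acc' : List (List Char) :=
          (match acc with
           | [] => []
           | a :: as => if PySem.Chars.strip a = [] then as else a :: as) with hacc'
        by_cases hd : 0 < pvCountBrace l
        · simp only [hd, if_pos]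
          rw [pvSkipFold rest _ acc' hd]
          have hsk : pvASkip 0 (l :: rest) = pvASkip (pvCountBrace l) rest := by
            simp only [pvASkip, Int.zero_add]
            split
            · omega
            · rfl
          rw [hsk]
          have hlen : (pvASkip (pvCountBrace l) rest).length ≤ n := by
            match rest with
            | [] => simp [pvASkip]
            | r :: rs => exact Nat.le_trans (pvASkip_len rs _ r) (Nat.le_trans (Nat.le_succ _) h)
          exact ih _ acc' hlen
        · simp only [hd, if_false]
          have hsk : pvASkip 0 (l :: rest) = rest := by
            simp only [pvASkip, Int.zero_add]
            split
            · rfl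
            · omega
          rw [hsk, pvDepthIrrel rest acc' _ 0]
          exact ih rest acc' h
      · -- ordinary line
        have hn' : PySem.Chars.isIn pvNeedle l = false := by
          cases hx : PySem.Chars.isIn pvNeedle l
          · rfl
          · exact absurd hx hn
        simp only [List.foldl, pvBStep, hn', if_false, Bool.false_eq_true]
        rw [pvAGo.eq_def]
        simp only [hn', if_pos]
        exact ih rest (l :: acc) h

-- ===== VERDICT (by name: the statement is the Claim_ definition above) =====
theorem remove_decode_base64_utf8_helper_py_spec : Claim_equal_remove_decode_base64_utf8_helper_py := by
  intro content _
  unfold Spec_remove_decode_base64_utf8_helper_py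
  unfold remove_decode_base64_utf8_helper_py remove_decode_base64_utf8_helper_py_alt
  rw [pvMain (pvSplitKeep content.toList).length _ [] (Nat.le_refl _), List.reverse_reverse]
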